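-- pv_equiv track=rewrite | github.com/Pratinav-Shrivastava/codeforces | Random/B_No_Casino_in_the_Mountains.py | hikes_mountains
-- ===== SOURCE A (Python) =====
-- def hikes_mountains(nums, k):
--     hikes = 0
--     consecutive_good_days = 0
--     i = 0
--     while i < len(nums):
--         if nums[i] == 0:
--             consecutive_good_days += 1
--             if consecutive_good_days == k:
--                 hikes += 1
--                 consecutive_good_days = 0
--                 i += 1
--         else:
--             consecutive_good_days = 0
--         i += 1
--     return hikes
-- ===== SOURCE B (Python) =====
-- def hikes_mountains(nums, k):
--     # run-length decomposition: each maximal run of L zeros yields (L+1)//(k+1) hikes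
--     if k <= 0:
--         return 0
--     total = 0
--     run = 0
--     for x in nums:
--         if x == 0:
--             run += 1
--         else:
--             total += (run + 1) // (k + 1)
--             run = 0
--     return total + (run + 1) // (k + 1)
-- ===== Notes on version B (the rewrite author's own statement) =====
-- stated objective: alternative
-- what changed: Replaces A's greedy index-skipping while loop (counter reset + extra i+=1 rest-day skip) by a single pass that measures each maximal run of zeros and adds the closed-form count (L+1)//(k+1) per run, with an upfront k<=0 -> 0 guard.
import Mathlib
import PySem

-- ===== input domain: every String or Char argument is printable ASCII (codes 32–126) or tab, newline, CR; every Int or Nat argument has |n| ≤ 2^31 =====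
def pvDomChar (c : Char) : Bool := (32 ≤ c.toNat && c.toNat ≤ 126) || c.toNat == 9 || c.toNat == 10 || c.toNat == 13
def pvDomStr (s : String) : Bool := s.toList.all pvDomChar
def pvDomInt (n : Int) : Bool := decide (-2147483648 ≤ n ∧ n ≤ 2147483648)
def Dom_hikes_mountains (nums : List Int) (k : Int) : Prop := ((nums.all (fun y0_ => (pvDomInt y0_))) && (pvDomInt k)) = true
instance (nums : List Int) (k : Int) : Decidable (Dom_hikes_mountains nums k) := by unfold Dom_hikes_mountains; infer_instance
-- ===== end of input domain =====

-- B replaces A's greedy index-skipping scan by a run-length decomposition with a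
-- closed-form count (L+1)//(k+1) per maximal zero-run (objective: alternative).

-- ===== PORT A =====
-- the while loop over index i, as recursion on the remaining list; the 'i += 1' inside
-- the hike branch plus the trailing 'i += 1' become 'rest.drop 1'
def hikesLoopA (k : Int) : List Int → Int → Int → Int
  | [], hikes, _ => hikes
  | x :: rest, hikes, c =>
    if x = 0 then
      if c + 1 = k then hikesLoopA k (rest.drop 1) (hikes + 1) 0
      else hikesLoopA k rest hikes (c + 1)
    else hikesLoopA k rest hikes 0
termination_by l _ _ => l.length
decreasing_by all_goals (simp; try omega)

def hikes_mountains (nums : List Int) (k : Int) : Int := hikesLoopA k nums 0 0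

-- ===== PORT B =====
def hikes_mountains_alt (nums : List Int) (k : Int) : Int :=
  if k ≤ 0 then 0
  else
    let p := nums.foldl
      (fun (s : Int × Int) x =>
        if x = 0 then (s.1, s.2 + 1)
        else (s.1 + PySem.Int.floordiv (s.2 + 1) (k + 1), 0))
      (0, 0)
    p.1 + PySem.Int.floordiv (p.2 + 1) (k + 1)

-- ===== PRECONDITION & SPEC =====
def Spec_hikes_mountains (nums : List Int) (k : Int) (out : Int) : Prop := out = hikes_mountains_alt nums k
instance (nums : List Int) (k : Int) (out : Int) : Decidable (Spec_hikes_mountains nums k out) := by unfold Spec_hikes_mountains; infer_instance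

-- ===== CLAIM (what is proved, stated in full; the proofs are below) =====
def Claim_equal_hikes_mountains : Prop := ∀ (nums : List Int) (k : Int), Dom_hikes_mountains nums k → Spec_hikes_mountains nums k (hikes_mountains nums k)

-- ===== LEMMAS AND PROOFS =====

-- B's fold, as a recursive helper carrying only the current run length
def gB (k : Int) : List Int → Int → Int
  | [], r => (r + 1) / (k + 1)
  | x :: l, r => if x = 0 then gB k l (r + 1) else (r + 1) / (k + 1) + gB k l 0

lemma foldl_eq_gB (k : Int) (hk : 1 ≤ k) (l : List Int) (t r : Int) :
    (l.foldl
      (fun (s : Int × Int) x =>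
        if x = 0 then (s.1, s.2 + 1)
        else (s.1 + PySem.Int.floordiv (s.2 + 1) (k + 1), 0))
      (t, r)).1 +
    PySem.Int.floordiv
      ((l.foldl
        (fun (s : Int × Int) x =>
          if x = 0 then (s.1, s.2 + 1)
          else (s.1 + PySem.Int.floordiv (s.2 + 1) (k + 1), 0))
        (t, r)).2 + 1) (k + 1)
    = t + gB k l r := by
  induction l generalizing t r with
  | nil =>
    simp only [List.foldl_nil, gB]
    rw [PySem.Int.floordiv_eq_ediv_of_pos (by omega)]
  | cons x l ih =>
    by_cases hx : x = 0
    · simp only [List.foldl_cons, if_pos hx, gB, ih]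
    · simp only [List.foldl_cons, if_neg hx, gB, ih]
      rw [PySem.Int.floordiv_eq_ediv_of_pos (by omega)]
      ring

-- k ≤ 0: the counter stays nonnegative, c + 1 = k never fires, A returns hikes unchanged
lemma loopA_nonpos (k : Int) (hk : k ≤ 0) :
    ∀ (l : List Int) (h c : Int), 0 ≤ c → hikesLoopA k l h c = h := by
  intro l
  induction l with
  | nil => intro h c _; simp [hikesLoopA]
  | cons x l ih =>
    intro h c hc
    by_cases hx : x = 0
    · have hne : ¬ (c + 1 = k) := by omega
      simp [hikesLoopA, hx, hne, ih h (c + 1) (by omega)]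
    · simp [hikesLoopA, hx, ih h 0 le_rfl]

-- k ≥ 1: adding one full period k+1 to the pending run adds exactly one hike
lemma gB_shift (k : Int) (hk : 1 ≤ k) :
    ∀ (l : List Int) (r : Int), gB k l (r + (k + 1)) = 1 + gB k l r := by
  intro l
  induction l with
  | nil =>
    intro r
    have : r + (k + 1) + 1 = (r + 1) + 1 * (k + 1) := by ring
    simp only [gB, this, Int.add_mul_ediv_right _ _ (by omega : k + 1 ≠ 0)]
    ring
  | cons x l ih =>
    intro r
    by_cases hx : x = 0
    · have : r + (k + 1) + 1 = r + 1 + (k + 1) := by ring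
      simp [gB, hx, this, ih]
    · have h1 : r + (k + 1) + 1 = (r + 1) + 1 * (k + 1) := by ring
      simp only [gB, if_neg hx]
      rw [h1, Int.add_mul_ediv_right _ _ (by omega : k + 1 ≠ 0)]
      ring

-- main invariant, k ≥ 1: with 0 ≤ c < k pending zeros, A's loop adds exactly gB k l c
lemma loopA_pos (k : Int) (hk : 1 ≤ k) :
    ∀ (n : Nat) (l : List Int) (h c : Int), l.length ≤ n → 0 ≤ c → c < k →
      hikesLoopA k l h c = h + gB k l c := by
  intro n
  induction n with
  | zero =>
    intro l h c hl hc0 hck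
    have : l = [] := by cases l <;> simp_all
    subst this
    have : (c + 1) / (k + 1) = 0 := Int.ediv_eq_zero_of_lt (by omega) (by omega)
    simp [hikesLoopA, gB, this]
  | succ n ih =>
    intro l h c hl hc0 hck
    cases l with
    | nil =>
      have : (c + 1) / (k + 1) = 0 := Int.ediv_eq_zero_of_lt (by omega) (by omega)
      simp [hikesLoopA, gB, this]
    | cons x rest =>
      by_cases hx : x = 0
      · by_cases hck1 : c + 1 = k
        · rw [hikesLoopA, if_pos hx, if_pos hck1]
          cases rest with
          | nil =>
            have h1 : (c + 1 + 1) / (k + 1) = 1 := by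
              rw [hck1]; exact Int.ediv_self (by omega)
            simp [hikesLoopA, gB, hx, h1]
          | cons y rest' =>
            rw [List.drop_one, List.tail_cons,
              ih rest' (h + 1) 0 (by simp only [List.length_cons] at hl; omega) le_rfl (by omega)]
            by_cases hy : y = 0
            · simp only [gB, if_pos hx, if_pos hy]
              rw [show c + 1 + 1 = (0 : Int) + (k + 1) by omega, gB_shift k hk]
              ring
            · have h1 : (c + 1 + 1) / (k + 1) = 1 := by
                rw [show c + 1 + 1 = k + 1 by omega]; exact Int.ediv_self (by omega)
              simp only [gB, if_pos hx, if_neg hy, h1]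
              ring
        · rw [hikesLoopA, if_pos hx, if_neg hck1,
            ih rest h (c + 1) (by simp only [List.length_cons] at hl; omega) (by omega) (by omega)]
          simp [gB, hx]
      · rw [hikesLoopA, if_neg hx,
          ih rest h 0 (by simp only [List.length_cons] at hl; omega) le_rfl (by omega)]
        have h0 : (c + 1) / (k + 1) = 0 := Int.ediv_eq_zero_of_lt (by omega) (by omega)
        simp [gB, hx, h0]

-- ===== VERDICT (by name: the statement is the Claim_ definition above) =====
theorem hikes_mountains_spec : Claim_equal_hikes_mountains := by
  intro nums k _
  unfold Spec_hikes_mountains hikes_mountains hikes_mountains_alt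
  by_cases hk : k ≤ 0
  · simp [hk, loopA_nonpos k hk nums 0 0 le_rfl]
  · have hk1 : 1 ≤ k := by omega
    rw [if_neg hk, loopA_pos k hk1 nums.length nums 0 0 le_rfl le_rfl (by omega)]
    simpa using (foldl_eq_gB k hk1 nums 0 0).symm
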